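-- pv_equiv track=rewrite | github.com/AntoineDubuc/Theodore | src/v2_research.py | _heuristic_page_selection
-- ===== SOURCE A (Python) =====
-- from typing import List, Dict, Any, Optional
--
-- def _heuristic_page_selection(all_links: List[str]) -> List[str]:
--     """Fallback heuristic page selection"""
--     priority_keywords = [
--         'about', 'company', 'careers', 'jobs', 'team', 'leadership',
--         'products', 'services', 'solutions', 'contact', 'news', 'press'
--     ]
--
--     scored_links = []
--     for link in all_links:
--         score = 0
--         link_lower = link.lower()
--
--         for keyword in priority_keywords:
--             if keyword in link_lower:
--                 score += 1
--
--         if score > 0: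
--             scored_links.append((link, score))
--
--     # Sort by score and return top 6
--     scored_links.sort(key=lambda x: x[1], reverse=True)
--     return [link for link, score in scored_links[:6]]
-- ===== SOURCE B (Python) =====
-- PRIORITY_KEYWORDS = [
--     'about', 'company', 'careers', 'jobs', 'team', 'leadership',
--     'products', 'services', 'solutions', 'contact', 'news', 'press'
-- ]
--
-- def _score(link):
--     low = link.lower()
--     return sum(1 for kw in PRIORITY_KEYWORDS if kw in low)
--
-- def _heuristic_page_selection(all_links):
--     """Bucket (counting-sort) variant: no comparison sort."""
--     buckets = [[] for _ in range(13)]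
--     for link in all_links:
--         s = _score(link)
--         if s > 0:
--             buckets[s].append(link)
--     result = []
--     for s in range(12, 0, -1):
--         result.extend(buckets[s])
--     return result[:6]
-- ===== Notes on version B (the rewrite author's own statement) =====
-- stated objective: alternative
-- what changed: Replaces the comparison sort over scored (link, score) pairs by a counting sort: links are appended to score-indexed buckets in input order and the buckets are emitted from score 12 down to 1, reproducing the stable descending order without sorting.
import Mathlib
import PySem

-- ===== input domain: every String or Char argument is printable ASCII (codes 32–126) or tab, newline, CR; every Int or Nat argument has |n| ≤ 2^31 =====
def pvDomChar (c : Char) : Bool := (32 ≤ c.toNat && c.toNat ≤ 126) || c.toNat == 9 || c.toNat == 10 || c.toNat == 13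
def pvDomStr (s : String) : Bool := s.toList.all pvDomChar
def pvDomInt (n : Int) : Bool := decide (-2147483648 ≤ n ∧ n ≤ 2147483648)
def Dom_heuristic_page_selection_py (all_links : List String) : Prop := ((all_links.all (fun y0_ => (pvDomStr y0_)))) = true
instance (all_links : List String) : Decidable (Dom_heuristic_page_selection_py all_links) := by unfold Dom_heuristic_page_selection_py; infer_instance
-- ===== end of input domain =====

-- B replaces A's comparison sort of scored links by a stable counting sort into score-indexed buckets (same results; alternative algorithm).


-- ===== PORT A =====
def pvPriorityKeywords : List String :=
  ["about", "company", "careers", "jobs", "team", "leadership",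
   "products", "services", "solutions", "contact", "news", "press"]

-- literal transliteration of A: build scored (link, score) pairs, sort by score descending (stable), take 6, project links
def heuristic_page_selection_py (all_links : List String) : List String :=
  let scored_links : List (String × Int) :=
    all_links.foldl (fun acc link =>
      let link_lower := PySem.Str.lower link
      let score : Int :=
        pvPriorityKeywords.foldl (fun s keyword =>
          if PySem.Str.isIn keyword link_lower then s + 1 else s) 0
      if score > 0 then acc ++ [(link, score)] else acc) []
  let sorted := PySem.List.sorted scored_links (fun x => x.2) true
  (PySem.List.slice sorted none (some 6)).map (fun x => x.1)

-- ===== PORT B =====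
-- B's helper _score: sum(1 for kw in PRIORITY_KEYWORDS if kw in link.lower())
def pvScore (link : String) : Int :=
  let low := PySem.Str.lower link
  (pvPriorityKeywords.map (fun kw => if PySem.Str.isIn kw low then (1 : Int) else 0)).sum

-- literal transliteration of B: counting sort into buckets[1..12], emit high score to low, take 6
def heuristic_page_selection_py_alt (all_links : List String) : List String :=
  let buckets : List (List String) :=
    all_links.foldl (fun bs link =>
      let s := pvScore link
      if s > 0 then bs.set s.toNat (bs.getD s.toNat [] ++ [link]) else bs)
      (List.replicate 13 [])
  let result : List String :=
    (PySem.List.pyRange 12 0 (-1)).foldl (fun r s => r ++ buckets.getD s.toNat []) []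
  PySem.List.slice result none (some 6)

-- ===== PRECONDITION & SPEC =====
def Spec_heuristic_page_selection_py (all_links : List String) (out : List String) : Prop := out = heuristic_page_selection_py_alt all_links
instance (all_links : List String) (out : List String) : Decidable (Spec_heuristic_page_selection_py all_links out) := by unfold Spec_heuristic_page_selection_py; infer_instance

-- ===== CLAIM (what is proved, stated in full; the proofs are below) =====
def Claim_equal_heuristic_page_selection_py : Prop := ∀ (all_links : List String), Dom_heuristic_page_selection_py all_links → Spec_heuristic_page_selection_py all_links (heuristic_page_selection_py all_links)

-- ===== LEMMAS AND PROOFS =====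

-- the descending list of possible positive scores
def pvScores : List Int := [12, 11, 10, 9, 8, 7, 6, 5, 4, 3, 2, 1]

lemma pvScore_mem_scores (l : String) (h : 0 < pvScore l) : pvScore l ∈ pvScores := by
  have hle : pvScore l ≤ 12 := by
    unfold pvScore
    have := List.sum_le_card_nsmul
      (pvPriorityKeywords.map (fun kw => if PySem.Str.isIn kw (PySem.Str.lower l) then (1 : Int) else 0))
      1 (by intro x hx; simp at hx; obtain ⟨kw, _, hkw⟩ := hx; split_ifs at hkw <;> omega)
    simpa [pvPriorityKeywords] using this
  unfold pvScores
  simp only [List.mem_cons, List.not_mem_nil, or_false]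
  omega

lemma pvScores_sorted : pvScores.Pairwise (· > ·) := by decide

-- a conditional-increment foldl is the sum of a 0/1 map
lemma foldl_count {α : Type} (p : α → Bool) :
    ∀ (kws : List α) (a : Int),
    kws.foldl (fun s kw => if p kw then s + 1 else s) a
      = a + (kws.map (fun kw => if p kw then (1 : Int) else 0)).sum := by
  intro kws
  induction kws with
  | nil => intro a; simp
  | cons k t ih =>
    intro a
    by_cases h : p k
    · simp [h, ih]
      ring
    · simp [h, ih]

-- A's per-link scoring loop computes pvScore
lemma scoreA_eq (l : String) :
    pvPriorityKeywords.foldl (fun s keyword =>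
      if PySem.Str.isIn keyword (PySem.Str.lower l) then s + 1 else s) 0 = pvScore l := by
  rw [foldl_count (fun kw => PySem.Str.isIn kw (PySem.Str.lower l))]
  simp [pvScore]

-- A's scored_links accumulation is a filter + map
lemma scoredA_eq (ls : List String) (acc : List (String × Int)) :
    ls.foldl (fun acc link =>
      let link_lower := PySem.Str.lower link
      let score : Int :=
        pvPriorityKeywords.foldl (fun s keyword =>
          if PySem.Str.isIn keyword link_lower then s + 1 else s) 0
      if score > 0 then acc ++ [(link, score)] else acc) acc
    = acc ++ (ls.filter (fun l => decide (0 < pvScore l))).map (fun l => (l, pvScore l)) := by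
  have hfun : (fun (acc : List (String × Int)) link =>
      let link_lower := PySem.Str.lower link
      let score : Int :=
        pvPriorityKeywords.foldl (fun s keyword =>
          if PySem.Str.isIn keyword link_lower then s + 1 else s) 0
      if score > 0 then acc ++ [(link, score)] else acc)
      = (fun acc link => if pvScore link > 0 then acc ++ [(link, pvScore link)] else acc) := by
    funext acc link
    simp only [scoreA_eq]
  rw [hfun]
  induction ls generalizing acc with
  | nil => simp
  | cons l t ih =>
    simp only [List.foldl_cons, List.filter_cons]
    by_cases h : 0 < pvScore l
    · rw [if_pos h, ih]
      simp [h]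
    · rw [if_neg h, ih]
      simp [h]

-- insertBy passes over a prefix whose elements it does not go before
lemma insertBy_append {α : Type} (b : α → α → Bool) (x : α) (as bs : List α)
    (h : ∀ y ∈ as, b x y = false) :
    PySem.List.insertBy b x (as ++ bs) = as ++ PySem.List.insertBy b x bs := by
  induction as with
  | nil => rfl
  | cons a t ih =>
    simp only [List.cons_append, PySem.List.insertBy, h a (by simp)]
    simp only [Bool.false_eq_true, if_false, List.cons.injEq, true_and]
    exact ih (fun y hy => h y (by simp [hy]))

-- inserting into a concatenation of strictly descending buckets appends to x's own bucket
lemma insertBy_flatMap {α : Type} (f : α → Int) (x : α) :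
    ∀ (ss : List Int), ss.Pairwise (· > ·) → f x ∈ ss →
    ∀ (g : Int → List α), (∀ s ∈ ss, ∀ y ∈ g s, f y = s) →
    PySem.List.insertBy (fun a b => decide (f b < f a)) x (ss.flatMap g)
      = ss.flatMap (fun s => g s ++ if f x == s then [x] else []) := by
  intro ss
  induction ss with
  | nil => intro _ hx; simp at hx
  | cons s t ih =>
    intro hp hx g hg
    have hgs : ∀ y ∈ g s, f y = s := hg s (by simp)
    have ht : ∀ s' ∈ t, s' < s := fun s' hs' => (List.pairwise_cons.mp hp).1 s' hs'
    simp only [List.flatMap_cons]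
    by_cases hxs : f x = s
    · -- x goes right after g s
      rw [insertBy_append _ _ _ _ (by intro y hy; simp [hgs y hy, hxs])]
      have hins : PySem.List.insertBy (fun a b => decide (f b < f a)) x (t.flatMap g)
          = x :: t.flatMap g := by
        cases hfm : t.flatMap g with
        | nil => rfl
        | cons z zs =>
          have hz : z ∈ t.flatMap g := by rw [hfm]; simp
          simp only [List.mem_flatMap] at hz
          obtain ⟨s', hs', hzs'⟩ := hz
          have : f z < f x := by
            rw [hg s' (by simp [hs']) z hzs', hxs]; exact ht s' hs'
          simp [PySem.List.insertBy, this]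
      rw [hins]
      have htail : t.flatMap (fun s' => g s' ++ if f x == s' then [x] else [])
          = t.flatMap g := by
        apply List.flatMap_congr
        intro s' hs'
        have : f x ≠ s' := by have := ht s' hs'; omega
        simp [this]
      rw [htail]
      simp [hxs]
    · -- x belongs to a later bucket
      have hxt : f x ∈ t := by
        rcases List.mem_cons.mp hx with h | h
        · exact absurd h hxs
        · exact h
      rw [insertBy_append _ _ _ _ (by
        intro y hy
        have := hgs y hy
        have := ht _ hxt
        simp only [decide_eq_false_iff_not, not_lt]
        omega)]
      rw [ih (List.pairwise_cons.mp hp).2 hxt g (fun s' hs' => hg s' (by simp [hs']))]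
      have : (f x == s) = false := by simp [hxs]
      simp [this]

-- stable reverse sort of a list with scores in pvScores is the bucket concatenation
lemma sorted_eq_buckets {α : Type} (f : α → Int) (L : List α)
    (hL : ∀ x ∈ L, f x ∈ pvScores) :
    PySem.List.sorted L f true = pvScores.flatMap (fun s => L.filter (fun x => f x == s)) := by
  rw [PySem.List.sorted_rev_eq_foldl_insertBy]
  induction L using List.reverseRecOn with
  | nil => simp [pvScores]
  | append_singleton t x ih =>
    rw [List.foldl_append, List.foldl_cons, List.foldl_nil,
      ih (fun y hy => hL y (by simp [hy])),
      insertBy_flatMap f x pvScores pvScores_sorted (hL x (by simp))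
        _ (by intro s _ y hy; simpa using (List.mem_filter.mp hy).2)]
    apply List.flatMap_congr
    intro s _
    by_cases h : f x = s <;> simp [List.filter_append, h]

-- B's bucket-filling foldl, characterised bucket by bucket
lemma bucketsB_getD (ls : List String) :
    ∀ (bs : List (List String)), bs.length = 13 →
    ∀ (t : Nat), t < 13 →
    (ls.foldl (fun bs link =>
        let s := pvScore link
        if s > 0 then bs.set s.toNat (bs.getD s.toNat [] ++ [link]) else bs) bs).getD t []
      = bs.getD t [] ++ ls.filter (fun l => decide (0 < pvScore l) && (pvScore l == (t : Int))) := by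
  induction ls with
  | nil => intro bs _ t _; simp
  | cons l ls ih =>
    intro bs hlen t ht
    simp only [List.foldl_cons, List.filter_cons]
    by_cases h : pvScore l > 0
    · have hmem := pvScore_mem_scores l h
      have hsn : (pvScore l).toNat < 13 := by
        unfold pvScores at hmem
        simp only [List.mem_cons, List.not_mem_nil, or_false] at hmem
        omega
      rw [if_pos h, ih _ (by simp [hlen]) t ht]
      by_cases he : (pvScore l).toNat = t
      · have heq : pvScore l = (t : Int) := by omega
        rw [List.getD_eq_getElem?_getD, he, List.getElem?_set_self (by omega), List.getD_eq_getElem?_getD]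
        simp only [heq, Option.getD_some, beq_self_eq_true, Bool.and_true, List.append_assoc,
          List.singleton_append]
        simp
        omega
      · have hne : pvScore l ≠ (t : Int) := by omega
        rw [List.getD_eq_getElem?_getD, List.getElem?_set_ne he, ← List.getD_eq_getElem?_getD]
        simp [hne, h]
    · rw [if_neg h, ih _ hlen t ht]
      simp [h]

-- appending foldl is a flatMap
lemma foldl_append_flatMap {α β : Type} (h : α → List β) (ss : List α) (r0 : List β) :
    ss.foldl (fun r s => r ++ h s) r0 = r0 ++ ss.flatMap h := by
  induction ss generalizing r0 with
  | nil => simp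
  | cons s t ih => simp [List.foldl_cons, ih, List.flatMap_cons]

lemma pyRange_12_0 : PySem.List.pyRange 12 0 (-1) = pvScores := by decide

-- ===== VERDICT (by name: the statement is the Claim_ definition above) =====
theorem heuristic_page_selection_py_spec : Claim_equal_heuristic_page_selection_py := by
  intro all_links _
  unfold Spec_heuristic_page_selection_py heuristic_page_selection_py heuristic_page_selection_py_alt
  simp only []
  rw [scoredA_eq all_links []]
  set links' := all_links.filter (fun l => decide (0 < pvScore l)) with hlinks'
  have hmem : ∀ x ∈ links'.map (fun l => (l, pvScore l)), (fun x : String × Int => x.2) x ∈ pvScores := by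
    intro x hx
    simp only [List.mem_map] at hx
    obtain ⟨l, hl, rfl⟩ := hx
    exact pvScore_mem_scores l (by simpa using (List.mem_filter.mp hl).2)
  rw [List.nil_append, sorted_eq_buckets _ _ hmem, pyRange_12_0, foldl_append_flatMap,
    List.nil_append]
  have h6 : (6 : Int) = ((6 : Nat) : Int) := by norm_num
  rw [h6]
  simp only [PySem.List.slice_to_natCast]
  rw [List.map_take]
  congr 1
  rw [List.map_flatMap]
  apply List.flatMap_congr
  intro s hs
  have hs1 : (1 : Int) ≤ s := by
    unfold pvScores at hs
    simp only [List.mem_cons, List.not_mem_nil, or_false] at hs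
    omega
  have hs12 : s ≤ 12 := by
    unfold pvScores at hs
    simp only [List.mem_cons, List.not_mem_nil, or_false] at hs
    omega
  have hcast : ((s.toNat : Nat) : Int) = s := by omega
  rw [bucketsB_getD all_links (List.replicate 13 []) (by simp) s.toNat (by omega)]
  rw [List.filter_map, List.map_map]
  simp only [Function.comp_def]
  rw [hlinks', List.filter_filter]
  have hpred : (fun a => (pvScore a == s) && decide (0 < pvScore a))
      = (fun a => decide (0 < pvScore a) && (pvScore a == ((s.toNat : Nat) : Int))) := by
    funext a
    rw [hcast]
    exact Bool.and_comm _ _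
  rw [hpred]
  · rw [List.map_id', List.getD_eq_getElem?_getD, List.getElem?_replicate,
      if_pos (show s.toNat < 13 from by omega)]
    rfl
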